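-- pv_equiv track=rewrite | github.com/vovgoo/CarSearch | scripts/get_number_car.py | null_test
-- ===== SOURCE A (Python) =====
-- def null_test(number):
--     null_test = [0,4,5]
--     result = []
--     for item in range(len(number)):
--         if item in null_test and number[item] == "0":
--             result.append("o")
--         else:
--             result.append(number[item])
--     return "".join(result)
-- ===== SOURCE B (Python) =====
-- def null_test(number):
--     result = list(number)
--     for p in (0, 4, 5):
--         if p < len(number) and number[p] == "0":
--             result[p] = "o"
--     return "".join(result)
-- ===== Notes on version B (the rewrite author's own statement) =====
-- stated objective: simpler
-- what changed: Instead of scanning every character and testing index membership in [0,4,5] per character, B copies the string once and updates only the three fixed positions (bounds-guarded), so the pass shape is a copy plus a constant-size targeted update.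
import Mathlib
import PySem

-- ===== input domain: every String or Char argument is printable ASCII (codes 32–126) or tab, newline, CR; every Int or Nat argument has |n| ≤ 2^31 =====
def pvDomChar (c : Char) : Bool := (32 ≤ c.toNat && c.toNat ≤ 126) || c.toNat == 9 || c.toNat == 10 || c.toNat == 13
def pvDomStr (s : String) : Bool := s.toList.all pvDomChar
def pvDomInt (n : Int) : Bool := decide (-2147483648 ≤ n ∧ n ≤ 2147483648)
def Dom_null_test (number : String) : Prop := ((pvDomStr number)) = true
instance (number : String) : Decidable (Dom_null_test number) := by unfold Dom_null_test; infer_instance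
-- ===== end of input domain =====

-- B copies the string once and updates only the three fixed positions instead of scanning every character; objective: simpler.


-- ===== PORT A =====
-- loop over range(len(number)), appending 'o' or the original character
def null_test (number : String) : String :=
  let chars := number.toList
  let result := (List.range chars.length).foldl
    (fun acc item =>
      if (item = 0 ∨ item = 4 ∨ item = 5) ∧ chars.getD item ' ' = '0'
      then acc ++ ['o'] else acc ++ [chars.getD item ' ']) []
  String.ofList result

-- ===== PORT B =====
-- copy the characters, then set only positions 0, 4, 5 (bounds-guarded)
def null_test_alt (number : String) : String :=
  let chars := number.toList
  let result := ([0, 4, 5] : List Nat).foldl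
    (fun acc p => if p < chars.length ∧ chars.getD p ' ' = '0' then acc.set p 'o' else acc) chars
  String.ofList result

-- ===== PRECONDITION & SPEC =====
def Spec_null_test (number : String) (out : String) : Prop := out = null_test_alt number
instance (number : String) (out : String) : Decidable (Spec_null_test number out) := by unfold Spec_null_test; infer_instance

-- ===== CLAIM (what is proved, stated in full; the proofs are below) =====
def Claim_equal_null_test : Prop := ∀ (number : String), Dom_null_test number → Spec_null_test number (null_test number)

-- ===== LEMMAS AND PROOFS =====

-- the A-side loop builds acc ++ map of the per-index function
theorem pv_foldl_app (chars : List Char) :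
    ∀ (l : List Nat) (acc : List Char),
      l.foldl (fun acc item =>
        if (item = 0 ∨ item = 4 ∨ item = 5) ∧ chars.getD item ' ' = '0'
        then acc ++ ['o'] else acc ++ [chars.getD item ' ']) acc
      = acc ++ l.map (fun item =>
          if (item = 0 ∨ item = 4 ∨ item = 5) ∧ chars.getD item ' ' = '0'
          then 'o' else chars.getD item ' ') := by
  intro l
  induction l with
  | nil => intro acc; simp
  | cons x xs ih =>
    intro acc
    by_cases h : (x = 0 ∨ x = 4 ∨ x = 5) ∧ chars.getD x ' ' = '0'
    · simp only [List.foldl_cons, List.map_cons, if_pos h, ih]; simp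
    · simp only [List.foldl_cons, List.map_cons, if_neg h, ih]; simp

theorem pv_main (chars : List Char) :
    (List.range chars.length).map (fun item =>
        if (item = 0 ∨ item = 4 ∨ item = 5) ∧ chars.getD item ' ' = '0'
        then 'o' else chars.getD item ' ')
    = ([0, 4, 5] : List Nat).foldl
        (fun acc p => if p < chars.length ∧ chars.getD p ' ' = '0' then acc.set p 'o' else acc) chars := by
  apply List.ext_getElem?
  intro i
  simp only [List.foldl_cons, List.foldl_nil, List.getElem?_map,
    apply_ite (fun l : List Char => l[i]?), List.getElem?_set,
    apply_ite List.length, List.length_set]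
  by_cases hi : i < chars.length
  · rw [List.getElem?_range hi]
    by_cases e0 : i = 0 <;> by_cases e4 : i = 4 <;> by_cases e5 : i = 5 <;>
      first
        | omega
        | (subst_vars
           simp [hi]
           split_ifs <;> simp_all)
        | (simp [hi, e0, e4, e5]
           split_ifs <;> simp_all)
  · have hr : (List.range chars.length)[i]? = none := by
      simp; omega
    have hc : chars[i]? = none := by simp; omega
    rw [hr]
    split_ifs <;> simp_all

theorem null_test_eq_alt (number : String) : null_test number = null_test_alt number := by
  unfold null_test null_test_alt
  simp only [pv_foldl_app, List.nil_append]
  rw [pv_main]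

-- ===== VERDICT (by name: the statement is the Claim_ definition above) =====
theorem null_test_spec : Claim_equal_null_test := by
  intro number _
  unfold Spec_null_test
  exact null_test_eq_alt number
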